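-- pv_equiv track=rewrite | github.com/Rim9810/v1-2data | cogs/aquarium.py | get_aquarium_capacity
-- ===== SOURCE A (Python) =====
-- AQUARIUM_CAPACITY = {
--     1: 2,
--     5: 3,
--     10: 4,
--     20: 5,
-- }
--
-- def get_aquarium_capacity(level: int) -> int:
--     """Gets the user's aquarium capacity based on their level."""
--     cap = 0  # Start with a default capacity of 0
--     # Sort the level requirements to ensure correct progressive checking
--     for lvl_req in sorted(AQUARIUM_CAPACITY.keys()):
--         if level >= lvl_req:
--             cap = AQUARIUM_CAPACITY[lvl_req]
--         else:
--             # Since the levels are sorted, we can stop once the user's level is too low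
--             break
--     return cap
-- ===== SOURCE B (Python) =====
-- AQUARIUM_CAPACITY = {
--     1: 2,
--     5: 3,
--     10: 4,
--     20: 5,
-- }
--
-- def get_aquarium_capacity(level: int) -> int:
--     """Gets the user's aquarium capacity based on their level."""
--     return max((cap for lvl_req, cap in AQUARIUM_CAPACITY.items() if level >= lvl_req),
--                default=0)
-- ===== Notes on version B (the rewrite author's own statement) =====
-- stated objective: simpler
-- what changed: Replaces the sort-then-sweep with accumulator and early break by a single unordered filter over dict items followed by max(..., default=0), relying on capacity increasing with threshold.
import Mathlib
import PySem

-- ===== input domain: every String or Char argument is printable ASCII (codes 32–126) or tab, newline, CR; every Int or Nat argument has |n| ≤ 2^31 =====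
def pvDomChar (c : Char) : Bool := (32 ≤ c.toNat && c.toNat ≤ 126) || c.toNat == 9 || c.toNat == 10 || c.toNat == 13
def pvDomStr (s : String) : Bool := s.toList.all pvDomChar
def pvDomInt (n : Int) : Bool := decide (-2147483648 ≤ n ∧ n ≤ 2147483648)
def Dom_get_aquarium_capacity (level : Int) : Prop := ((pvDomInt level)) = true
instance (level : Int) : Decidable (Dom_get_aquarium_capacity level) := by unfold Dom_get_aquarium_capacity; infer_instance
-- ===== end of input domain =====

-- B replaces A's sort + ordered accumulator sweep with early break by an unordered
-- filter of the dict items followed by a max with default 0 (simpler; same result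
-- because capacity increases with threshold).

-- AQUARIUM_CAPACITY, shared module constant (dict as association list in insertion order)
def AQUARIUM_CAPACITY : PySem.Dict Int Int := PySem.Dict.ofList [(1, 2), (5, 3), (10, 4), (20, 5)]

-- ===== PORT A =====
-- the for-loop over sorted keys with early break, as structural recursion on the key list
def aqLoopA (level : Int) (cap : Int) : List Int → Int
  | [] => cap
  | k :: rest =>
      if level ≥ k then aqLoopA level (PySem.Dict.getD AQUARIUM_CAPACITY k 0) rest
      else cap  -- break

def get_aquarium_capacity (level : Int) : Int :=
  aqLoopA level 0 (PySem.List.sorted (PySem.Dict.keys AQUARIUM_CAPACITY) (fun x => x))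

-- ===== PORT B =====
def get_aquarium_capacity_alt (level : Int) : Int :=
  -- max(cap for (lvl_req, cap) in items if level >= lvl_req, default=0)
  match ((PySem.Dict.items AQUARIUM_CAPACITY).filter (fun p => decide (level ≥ p.1))).map Prod.snd with
  | [] => 0
  | c :: cs => cs.foldl max c

-- ===== PRECONDITION & SPEC =====
def Spec_get_aquarium_capacity (level : Int) (out : Int) : Prop := out = get_aquarium_capacity_alt level
instance (level : Int) (out : Int) : Decidable (Spec_get_aquarium_capacity level out) := by unfold Spec_get_aquarium_capacity; infer_instance

-- ===== CLAIM (what is proved, stated in full; the proofs are below) =====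
def Claim_equal_get_aquarium_capacity : Prop := ∀ (level : Int), Dom_get_aquarium_capacity level → Spec_get_aquarium_capacity level (get_aquarium_capacity level)

-- ===== LEMMAS AND PROOFS =====

-- ===== VERDICT (by name: the statement is the Claim_ definition above) =====
theorem get_aquarium_capacity_spec : Claim_equal_get_aquarium_capacity := by
  intro level _
  unfold Spec_get_aquarium_capacity get_aquarium_capacity get_aquarium_capacity_alt
  rw [show PySem.List.sorted (PySem.Dict.keys AQUARIUM_CAPACITY) (fun x => x) = [1, 5, 10, 20] from by decide,
      show PySem.Dict.items AQUARIUM_CAPACITY = [(1, 2), (5, 3), (10, 4), (20, 5)] from by decide]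
  have g1 : PySem.Dict.getD AQUARIUM_CAPACITY 1 0 = 2 := by decide
  have g5 : PySem.Dict.getD AQUARIUM_CAPACITY 5 0 = 3 := by decide
  have g10 : PySem.Dict.getD AQUARIUM_CAPACITY 10 0 = 4 := by decide
  have g20 : PySem.Dict.getD AQUARIUM_CAPACITY 20 0 = 5 := by decide
  by_cases h20 : (20 : Int) ≤ level <;> by_cases h10 : (10 : Int) ≤ level <;>
    by_cases h5 : (5 : Int) ≤ level <;> by_cases h1 : (1 : Int) ≤ level <;>
    simp [aqLoopA, List.filter, g1, g5, g10, g20, h20, h10, h5, h1] <;> omega
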